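-- pv_equiv track=rewrite | github.com/emylincon/deadlock_project | 3algo/python_data/exec_report.py | group_format
-- ===== SOURCE A (Python) =====
-- def format_data(d_dict):
--     t_data = {}
--     _keys = list(d_dict.keys())
--     s4 = 0
--     s7 = 1
--     s10 = 2
--
--     for i in range(len(_keys)):
--         j = _keys[i]
--         if i == s4:
--             if 4 in t_data:
--                 t_data[4].append(d_dict[j])
--
--                 s4 += 3
--             else:
--                 t_data[4] = [d_dict[j]]
--
--                 s4 += 3
--         elif i == s7:
--             if 7 in t_data:
--                 t_data[7].append(d_dict[j])
--
--                 s7 += 3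
--             else:
--                 t_data[7] = [d_dict[j]]
--
--                 s7 += 3
--         elif i == s10:
--             if 10 in t_data:
--                 t_data[10].append(d_dict[j])
--
--                 s10 += 3
--             else:
--                 t_data[10] = [d_dict[j]]
--
--                 s10 += 3
--
--     return t_data
--
-- def group_format(data_list):
--     format_list = []
--     for i in data_list:
--         format_list.append(format_data(i))
--
--     group_list = {4: {},
--                   7: {},
--                   10: {},
--                   }
--
--     for i in format_list:
--         for j in i:
--             _list_ = i[j]
--             for key in range(len(_list_)):
--                 value = _list_[key]
--                 d_dict = group_list[j]
--                 if key in d_dict: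
--                     d_dict[key].append(value)
--                 else:
--                     d_dict[key] = [value]
--
--     return group_list
-- ===== SOURCE B (Python) =====
-- def group_format(data_list):
--     group_list = {4: {}, 7: {}, 10: {}}
--     for d in data_list:
--         for i, value in enumerate(d.values()):
--             group_list[(4, 7, 10)[i % 3]].setdefault(i // 3, []).append(value)
--     return group_list
-- ===== Notes on version B (the rewrite author's own statement) =====
-- stated objective: simpler
-- what changed: B fuses A's two stages (per-dict format_data tables plus a second regrouping pass) into one enumerate loop that computes the group key as (4,7,10)[i % 3] and the inner position as i // 3 directly, building no intermediate list of dicts.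
import Mathlib
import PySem

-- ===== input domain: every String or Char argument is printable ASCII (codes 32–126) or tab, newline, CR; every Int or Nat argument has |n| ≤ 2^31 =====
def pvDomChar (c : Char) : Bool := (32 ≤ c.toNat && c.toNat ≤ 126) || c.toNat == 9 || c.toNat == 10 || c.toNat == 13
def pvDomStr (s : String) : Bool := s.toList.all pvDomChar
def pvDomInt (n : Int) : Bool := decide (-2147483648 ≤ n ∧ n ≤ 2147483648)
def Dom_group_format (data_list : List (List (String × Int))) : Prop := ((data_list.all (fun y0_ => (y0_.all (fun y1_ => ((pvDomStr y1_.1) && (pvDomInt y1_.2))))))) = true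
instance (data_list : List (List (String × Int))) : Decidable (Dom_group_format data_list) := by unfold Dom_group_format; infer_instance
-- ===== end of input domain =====

-- B fuses A's two stages into one pass with index arithmetic (i % 3 / i // 3); same return value, alternative decomposition.

-- ===== PORT A =====
-- body of format_data's `for i in range(len(_keys))` loop, state (t_data, s4, s7, s10)
def format_data_step (d_dict : PySem.Dict String Int)
    (st : PySem.Dict Int (List Int) × Int × Int × Int) (i : Int) :
    PySem.Dict Int (List Int) × Int × Int × Int :=
  let t_data := st.1; let s4 := st.2.1; let s7 := st.2.2.1; let s10 := st.2.2.2
  let j := PySem.List.pyGetD d_dict.keys i ""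
  let v := d_dict.getD j 0      -- d_dict[j]: j is a key of d_dict, so no KeyError
  if i == s4 then
    (if t_data.contains 4 then t_data.insert 4 (t_data.getD 4 [] ++ [v])
     else t_data.insert 4 [v], s4 + 3, s7, s10)
  else if i == s7 then
    (if t_data.contains 7 then t_data.insert 7 (t_data.getD 7 [] ++ [v])
     else t_data.insert 7 [v], s4, s7 + 3, s10)
  else if i == s10 then
    (if t_data.contains 10 then t_data.insert 10 (t_data.getD 10 [] ++ [v])
     else t_data.insert 10 [v], s4, s7, s10 + 3)
  else st

def format_data (d_dict : PySem.Dict String Int) : PySem.Dict Int (List Int) :=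
  ((PySem.List.pyRange 0 (d_dict.keys.length : Int) 1).foldl (format_data_step d_dict)
    (PySem.Dict.empty, 0, 1, 2)).1

-- body of the `for key in range(len(_list_))` loop of group_format
def group_format_key_step (j : Int) (_list_ : List Int)
    (gl : PySem.Dict Int (PySem.Dict Int (List Int))) (key : Int) :
    PySem.Dict Int (PySem.Dict Int (List Int)) :=
  let value := PySem.List.pyGetD _list_ key 0
  let d_dict := gl.getD j PySem.Dict.empty   -- group_list[j]: j ∈ {4,7,10}, always present
  let d_dict' := if d_dict.contains key then d_dict.insert key (d_dict.getD key [] ++ [value])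
                 else d_dict.insert key [value]
  gl.insert j d_dict'

-- body of `for j in i` (keys of a format_data result are distinct, so items gives (j, i[j]) pairs)
def group_format_item_step (gl : PySem.Dict Int (PySem.Dict Int (List Int)))
    (ji : Int × List Int) : PySem.Dict Int (PySem.Dict Int (List Int)) :=
  (PySem.List.pyRange 0 (ji.2.length : Int) 1).foldl (group_format_key_step ji.1 ji.2) gl

-- body of `for i in format_list`
def group_format_dict_step (gl : PySem.Dict Int (PySem.Dict Int (List Int)))
    (i : PySem.Dict Int (List Int)) : PySem.Dict Int (PySem.Dict Int (List Int)) :=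
  i.items.foldl group_format_item_step gl

def group_format (data_list : List (List (String × Int))) : List (Int × List (Int × List Int)) :=
  let format_list := data_list.foldl (fun acc i => acc ++ [format_data (PySem.Dict.ofList i)]) []
  let group_list : PySem.Dict Int (PySem.Dict Int (List Int)) :=
    PySem.Dict.ofList [(4, PySem.Dict.empty), (7, PySem.Dict.empty), (10, PySem.Dict.empty)]
  let g := format_list.foldl group_format_dict_step group_list
  g.items.map (fun kv => (kv.1, kv.2.items))

-- ===== PORT B =====
-- one fused step: group_list[(4,7,10)[i % 3]].setdefault(i // 3, []).append(v) is a nested Dict.modify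
def group_format_alt_step (gl : PySem.Dict Int (PySem.Dict Int (List Int)))
    (iv : Int × Int) : PySem.Dict Int (PySem.Dict Int (List Int)) :=
  gl.modify (PySem.List.pyGetD ([4, 7, 10] : List Int) (PySem.Int.mod iv.1 3) 0)
    PySem.Dict.empty
    (fun inner => inner.modify (PySem.Int.floordiv iv.1 3) [] (fun l => l ++ [iv.2]))

-- body of `for d in data_list`: enumerate(d.values())
def group_format_alt_dict_step (gl : PySem.Dict Int (PySem.Dict Int (List Int)))
    (d : List (String × Int)) : PySem.Dict Int (PySem.Dict Int (List Int)) :=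
  (PySem.List.enumerate (PySem.Dict.ofList d).values 0).foldl group_format_alt_step gl

def group_format_alt (data_list : List (List (String × Int))) : List (Int × List (Int × List Int)) :=
  let g := data_list.foldl group_format_alt_dict_step
    (PySem.Dict.ofList [(4, PySem.Dict.empty), (7, PySem.Dict.empty), (10, PySem.Dict.empty)])
  g.items.map (fun kv => (kv.1, kv.2.items))

-- ===== PRECONDITION & SPEC =====
def Spec_group_format (data_list : List (List (String × Int))) (out : List (Int × List (Int × List Int))) : Prop := out = group_format_alt data_list
instance (data_list : List (List (String × Int))) (out : List (Int × List (Int × List Int))) : Decidable (Spec_group_format data_list out) := by unfold Spec_group_format; infer_instance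

-- ===== CLAIM (what is proved, stated in full; the proofs are below) =====
def Claim_equal_group_format : Prop := ∀ (data_list : List (List (String × Int))), Dom_group_format data_list → Spec_group_format data_list (group_format data_list)

-- ===== LEMMAS AND PROOFS =====

-- the group_list dict: its key list [4, 7, 10] never changes, only the three inner dicts do
def pvG (a b c : PySem.Dict Int (List Int)) : PySem.Dict Int (PySem.Dict Int (List Int)) :=
  PySem.Dict.mk [(4, a), (7, b), (10, c)]

-- appending one value at inner key k
def pvUpd (k v : Int) (dd : PySem.Dict Int (List Int)) : PySem.Dict Int (List Int) :=
  dd.modify k [] (fun l => l ++ [v])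

-- appending a whole stripe at inner keys m, m+1, …
def pvPush : Nat → PySem.Dict Int (List Int) → List Int → PySem.Dict Int (List Int)
  | _, dd, [] => dd
  | m, dd, v :: vs => pvPush (m + 1) (pvUpd (m : Int) v dd) vs

-- split a value list into its three index-residue stripes
def pvSpl : List Int → List Int × List Int × List Int
  | [] => ([], [], [])
  | [x] => ([x], [], [])
  | [x, y] => ([x], [y], [])
  | x :: y :: z :: rest =>
      let t := pvSpl rest; (x :: t.1, y :: t.2.1, z :: t.2.2)

-- format_data's loop body, re-expressed on the (index, value) pair it actually consumes
def pvFdStep (st : PySem.Dict Int (List Int) × Int × Int × Int) (p : Int × Int) :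
    PySem.Dict Int (List Int) × Int × Int × Int :=
  let t_data := st.1; let s4 := st.2.1; let s7 := st.2.2.1; let s10 := st.2.2.2
  if p.1 == s4 then
    (if t_data.contains 4 then t_data.insert 4 (t_data.getD 4 [] ++ [p.2])
     else t_data.insert 4 [p.2], s4 + 3, s7, s10)
  else if p.1 == s7 then
    (if t_data.contains 7 then t_data.insert 7 (t_data.getD 7 [] ++ [p.2])
     else t_data.insert 7 [p.2], s4, s7 + 3, s10)
  else if p.1 == s10 then
    (if t_data.contains 10 then t_data.insert 10 (t_data.getD 10 [] ++ [p.2])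
     else t_data.insert 10 [p.2], s4, s7, s10 + 3)
  else st

-- the items list format_data produces, by value-list shape
def pvItems : List Int → List (Int × List Int)
  | [] => []
  | [x] => [(4, [x])]
  | [x, y] => [(4, [x]), (7, [y])]
  | x :: y :: z :: rest =>
      [(4, x :: (pvSpl rest).1), (7, y :: (pvSpl rest).2.1), (10, z :: (pvSpl rest).2.2)]

-- shape lemmas for pvG
theorem pvG_getD4 (a b c : PySem.Dict Int (List Int)) : (pvG a b c).getD 4 PySem.Dict.empty = a := by
  simp [pvG, PySem.Dict.getD, PySem.Dict.get?]
theorem pvG_getD7 (a b c : PySem.Dict Int (List Int)) : (pvG a b c).getD 7 PySem.Dict.empty = b := by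
  simp [pvG, PySem.Dict.getD, PySem.Dict.get?]
theorem pvG_getD10 (a b c : PySem.Dict Int (List Int)) : (pvG a b c).getD 10 PySem.Dict.empty = c := by
  simp [pvG, PySem.Dict.getD, PySem.Dict.get?]
theorem pvG_insert4 (a b c x : PySem.Dict Int (List Int)) : (pvG a b c).insert 4 x = pvG x b c := by
  simp [pvG, PySem.Dict.insert, PySem.Dict.contains]
theorem pvG_insert7 (a b c x : PySem.Dict Int (List Int)) : (pvG a b c).insert 7 x = pvG a x c := by
  simp [pvG, PySem.Dict.insert, PySem.Dict.contains]
theorem pvG_insert10 (a b c x : PySem.Dict Int (List Int)) : (pvG a b c).insert 10 x = pvG a b x := by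
  simp [pvG, PySem.Dict.insert, PySem.Dict.contains]
theorem pvG_modify4 (a b c : PySem.Dict Int (List Int)) (f : PySem.Dict Int (List Int) → PySem.Dict Int (List Int)) :
    (pvG a b c).modify 4 PySem.Dict.empty f = pvG (f a) b c := by
  simp [PySem.Dict.modify, pvG_getD4, pvG_insert4]
theorem pvG_modify7 (a b c : PySem.Dict Int (List Int)) (f : PySem.Dict Int (List Int) → PySem.Dict Int (List Int)) :
    (pvG a b c).modify 7 PySem.Dict.empty f = pvG a (f b) c := by
  simp [PySem.Dict.modify, pvG_getD7, pvG_insert7]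
theorem pvG_modify10 (a b c : PySem.Dict Int (List Int)) (f : PySem.Dict Int (List Int) → PySem.Dict Int (List Int)) :
    (pvG a b c).modify 10 PySem.Dict.empty f = pvG a b (f c) := by
  simp [PySem.Dict.modify, pvG_getD10, pvG_insert10]

-- A's if/else inner update is exactly pvUpd
theorem pvUpd_eq (k v : Int) (dd : PySem.Dict Int (List Int)) :
    (if dd.contains k then dd.insert k (dd.getD k [] ++ [v]) else dd.insert k [v]) = pvUpd k v dd := by
  unfold pvUpd PySem.Dict.modify
  by_cases h : dd.contains k
  · simp [h]
  · rw [PySem.Dict.getD_of_not_contains dd [] (by simpa using h)]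
    simp [h]

-- A's key loop on the pvG shape (one lemma per group key)
theorem keyStep_val (j : Int) (lst : List Int) (gl : PySem.Dict Int (PySem.Dict Int (List Int))) (n : Nat) (h : n < lst.length) :
    group_format_key_step j lst gl (n : Int)
      = gl.insert j (pvUpd (n : Int) lst[n] (gl.getD j PySem.Dict.empty)) := by
  simp only [group_format_key_step]
  rw [pvUpd_eq]
  simp [h]

theorem A_inner4 (lst : List Int) : ∀ (fuel n : Nat), lst.length - n = fuel →
    ∀ a b c, (PySem.List.pyRange (n : Int) (lst.length : Int) 1).foldl (group_format_key_step 4 lst) (pvG a b c)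
      = pvG (pvPush n a (lst.drop n)) b c := by
  intro fuel
  induction fuel with
  | zero =>
    intro n hn a b c
    have h : lst.length ≤ n := by omega
    rw [PySem.List.pyRange_one_eq_nil (by exact_mod_cast h), List.drop_eq_nil_of_le h]
    simp [pvPush]
  | succ fuel ih =>
    intro n hn a b c
    have h : n < lst.length := by omega
    rw [PySem.List.pyRange_one_cons (by exact_mod_cast h), List.drop_eq_getElem_cons h]
    simp only [List.foldl_cons]
    rw [keyStep_val 4 lst _ n h, pvG_getD4, pvG_insert4]
    have hc : ((n : Int) + 1) = ((n + 1 : Nat) : Int) := by push_cast; ring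
    rw [hc, ih (n + 1) (by omega)]
    simp [pvPush]
theorem A_inner7 (lst : List Int) : ∀ (fuel n : Nat), lst.length - n = fuel →
    ∀ a b c, (PySem.List.pyRange (n : Int) (lst.length : Int) 1).foldl (group_format_key_step 7 lst) (pvG a b c)
      = pvG a (pvPush n b (lst.drop n)) c := by
  intro fuel
  induction fuel with
  | zero =>
    intro n hn a b c
    have h : lst.length ≤ n := by omega
    rw [PySem.List.pyRange_one_eq_nil (by exact_mod_cast h), List.drop_eq_nil_of_le h]
    simp [pvPush]
  | succ fuel ih =>
    intro n hn a b c
    have h : n < lst.length := by omega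
    rw [PySem.List.pyRange_one_cons (by exact_mod_cast h), List.drop_eq_getElem_cons h]
    simp only [List.foldl_cons]
    rw [keyStep_val 7 lst _ n h, pvG_getD7, pvG_insert7]
    have hc : ((n : Int) + 1) = ((n + 1 : Nat) : Int) := by push_cast; ring
    rw [hc, ih (n + 1) (by omega)]
    simp [pvPush]
theorem A_inner10 (lst : List Int) : ∀ (fuel n : Nat), lst.length - n = fuel →
    ∀ a b c, (PySem.List.pyRange (n : Int) (lst.length : Int) 1).foldl (group_format_key_step 10 lst) (pvG a b c)
      = pvG a b (pvPush n c (lst.drop n)) := by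
  intro fuel
  induction fuel with
  | zero =>
    intro n hn a b c
    have h : lst.length ≤ n := by omega
    rw [PySem.List.pyRange_one_eq_nil (by exact_mod_cast h), List.drop_eq_nil_of_le h]
    simp [pvPush]
  | succ fuel ih =>
    intro n hn a b c
    have h : n < lst.length := by omega
    rw [PySem.List.pyRange_one_cons (by exact_mod_cast h), List.drop_eq_getElem_cons h]
    simp only [List.foldl_cons]
    rw [keyStep_val 10 lst _ n h, pvG_getD10, pvG_insert10]
    have hc : ((n : Int) + 1) = ((n + 1 : Nat) : Int) := by push_cast; ring
    rw [hc, ih (n + 1) (by omega)]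
    simp [pvPush]

theorem itemStep4 (lst : List Int) (a b c : PySem.Dict Int (List Int)) :
    group_format_item_step (pvG a b c) (4, lst) = pvG (pvPush 0 a lst) b c := by
  simpa using A_inner4 lst lst.length 0 rfl a b c
theorem itemStep7 (lst : List Int) (a b c : PySem.Dict Int (List Int)) :
    group_format_item_step (pvG a b c) (7, lst) = pvG a (pvPush 0 b lst) c := by
  simpa using A_inner7 lst lst.length 0 rfl a b c
theorem itemStep10 (lst : List Int) (a b c : PySem.Dict Int (List Int)) :
    group_format_item_step (pvG a b c) (10, lst) = pvG a b (pvPush 0 c lst) := by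
  simpa using A_inner10 lst lst.length 0 rfl a b c

-- index loop over keys = pair loop over (index, value) pairs
theorem foldl_idx_enum {α β : Type} (vs : List α) (g : β → Int → β) (f : β → Int × α → β)
    (hg : ∀ acc (i : Nat) (h : i < vs.length), g acc (i : Int) = f acc ((i : Int), vs[i])) :
    ∀ (fuel n : Nat), vs.length - n = fuel → ∀ init,
      (PySem.List.pyRange (n : Int) (vs.length : Int) 1).foldl g init
        = (PySem.List.enumerate (vs.drop n) (n : Int)).foldl f init := by
  intro fuel
  induction fuel with
  | zero =>
    intro n hn init
    have h : vs.length ≤ n := by omega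
    rw [PySem.List.pyRange_one_eq_nil (by exact_mod_cast h), List.drop_eq_nil_of_le h]
    simp [PySem.List.enumerate]
  | succ fuel ih =>
    intro n hn init
    have h : n < vs.length := by omega
    rw [PySem.List.pyRange_one_cons (by exact_mod_cast h), List.drop_eq_getElem_cons h,
      PySem.List.enumerate_cons]
    simp only [List.foldl_cons]
    rw [hg init n h]
    have hc : ((n : Int) + 1) = ((n + 1 : Nat) : Int) := by push_cast; ring
    rw [hc, ih (n + 1) (by omega)]

-- format_data's loop consumes exactly the (index, value) pairs of d_dict
theorem fd_eq (dd : PySem.Dict String Int) (hnd : dd.keys.Nodup) :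
    format_data dd = ((PySem.List.enumerate dd.values 0).foldl pvFdStep (PySem.Dict.empty, 0, 1, 2)).1 := by
  have hlen : dd.keys.length = dd.values.length := by
    simp [PySem.Dict.keys, PySem.Dict.values]
  have hg : ∀ (st : PySem.Dict Int (List Int) × Int × Int × Int) (i : Nat) (h : i < dd.values.length),
      format_data_step dd st (i : Int) = pvFdStep st ((i : Int), dd.values[i]) := by
    intro st i h
    have hik : i < dd.keys.length := by omega
    have hii : i < dd.items.length := by simpa [PySem.Dict.keys] using hik
    have hk : dd.keys[i] = (dd.items[i]).1 := by simp [PySem.Dict.keys]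
    have hv : dd.values[i]'h = (dd.items[i]).2 := by simp [PySem.Dict.values]
    have hmem : ((dd.items[i]).1, (dd.items[i]).2) ∈ dd.items := by
      simp
    have hget : dd.getD (dd.keys[i]) 0 = dd.values[i]'h := by
      rw [hk, hv]; exact PySem.Dict.getD_of_mem_items dd hmem hnd 0
    simp only [format_data_step, pvFdStep]
    rw [show PySem.List.pyGetD dd.keys (i : Int) "" = dd.keys[i] by simp [hik]]
    rw [hget]
  unfold format_data
  rw [show ((dd.keys.length : Int)) = ((dd.values.length : Int)) by exact_mod_cast hlen]
  have := foldl_idx_enum dd.values (format_data_step dd) pvFdStep hg dd.values.length 0 (by omega)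
    (PySem.Dict.empty, 0, 1, 2)
  rw [congrArg Prod.fst (by simpa using this)]

-- the three counter-shape steps of format_data's loop on the full three-key dict
theorem fd_step0 (m : Int) (a b c : List Int) (x : Int) :
    pvFdStep (PySem.Dict.mk [(4, a), (7, b), (10, c)], 3 * m, 3 * m + 1, 3 * m + 2) (3 * m, x)
      = (PySem.Dict.mk [(4, a ++ [x]), (7, b), (10, c)], 3 * m + 3, 3 * m + 1, 3 * m + 2) := by
  simp [pvFdStep, PySem.Dict.contains, PySem.Dict.getD, PySem.Dict.get?, PySem.Dict.insert]

theorem fd_step1 (m : Int) (a b c : List Int) (y : Int) :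
    pvFdStep (PySem.Dict.mk [(4, a), (7, b), (10, c)], 3 * m + 3, 3 * m + 1, 3 * m + 2) (3 * m + 1, y)
      = (PySem.Dict.mk [(4, a), (7, b ++ [y]), (10, c)], 3 * m + 3, 3 * m + 4, 3 * m + 2) := by
  have h1 : ((3 * m + 1 : Int) == (3 * m + 3)) = false := by
    simp only [beq_eq_false_iff_ne]; omega
  simp [pvFdStep, h1, PySem.Dict.contains, PySem.Dict.getD, PySem.Dict.get?, PySem.Dict.insert]
  omega

theorem fd_step2 (m : Int) (a b c : List Int) (z : Int) :
    pvFdStep (PySem.Dict.mk [(4, a), (7, b), (10, c)], 3 * m + 3, 3 * m + 4, 3 * m + 2) (3 * m + 2, z)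
      = (PySem.Dict.mk [(4, a), (7, b), (10, c ++ [z])], 3 * m + 3, 3 * m + 4, 3 * m + 5) := by
  have h1 : ((3 * m + 2 : Int) == (3 * m + 3)) = false := by
    simp only [beq_eq_false_iff_ne]; omega
  have h2 : ((3 * m + 2 : Int) == (3 * m + 4)) = false := by
    simp only [beq_eq_false_iff_ne]; omega
  simp [pvFdStep, h1, h2, PySem.Dict.contains, PySem.Dict.getD, PySem.Dict.get?, PySem.Dict.insert]
  omega

-- the counter loop on the full three-key shape appends the three stripes
theorem fd_full : ∀ (vs : List Int) (m : Nat) (a b c : List Int),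
    ((PySem.List.enumerate vs (3 * (m : Int))).foldl pvFdStep
        (PySem.Dict.mk [(4, a), (7, b), (10, c)], 3 * (m : Int), 3 * (m : Int) + 1, 3 * (m : Int) + 2)).1
      = PySem.Dict.mk [(4, a ++ (pvSpl vs).1), (7, b ++ (pvSpl vs).2.1), (10, c ++ (pvSpl vs).2.2)] := by
  intro vs m a b c
  have main : ∀ (fuel : Nat) (vs : List Int), vs.length ≤ fuel → ∀ (m : Nat) (a b c : List Int),
      ((PySem.List.enumerate vs (3 * (m : Int))).foldl pvFdStep
        (PySem.Dict.mk [(4, a), (7, b), (10, c)], 3 * (m : Int), 3 * (m : Int) + 1, 3 * (m : Int) + 2)).1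
      = PySem.Dict.mk [(4, a ++ (pvSpl vs).1), (7, b ++ (pvSpl vs).2.1), (10, c ++ (pvSpl vs).2.2)] := by
    intro fuel
    induction fuel with
    | zero =>
      intro vs hl m a b c
      have : vs = [] := List.length_eq_zero_iff.mp (by omega)
      subst this
      simp [PySem.List.enumerate, pvSpl]
    | succ fuel ih =>
      intro vs hl m a b c
      rcases vs with _ | ⟨x, _ | ⟨y, _ | ⟨z, rest⟩⟩⟩
      · simp [PySem.List.enumerate, pvSpl]
      · rw [PySem.List.enumerate_cons, PySem.List.enumerate_nil]
        simp only [List.foldl_cons, List.foldl_nil]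
        rw [fd_step0]
        simp [pvSpl]
      · rw [PySem.List.enumerate_cons, PySem.List.enumerate_cons, PySem.List.enumerate_nil]
        simp only [List.foldl_cons, List.foldl_nil]
        rw [fd_step0, fd_step1]
        simp [pvSpl]
      · rw [PySem.List.enumerate_cons, PySem.List.enumerate_cons, PySem.List.enumerate_cons]
        simp only [List.foldl_cons]
        rw [fd_step0, show (3 * (m : Int) + 1 + 1) = 3 * (m : Int) + 2 by ring, fd_step1, fd_step2]
        rw [show (3 * (m : Int) + 2 + 1) = 3 * ((m + 1 : Nat) : Int) by push_cast; ring]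
        rw [show (3 * (m : Int) + 3) = 3 * ((m + 1 : Nat) : Int) by push_cast; ring]
        rw [show (3 * (m : Int) + 4) = 3 * ((m + 1 : Nat) : Int) + 1 by push_cast; ring]
        rw [show (3 * (m : Int) + 5) = 3 * ((m + 1 : Nat) : Int) + 2 by push_cast; ring]
        rw [ih rest (by simp only [List.length_cons] at hl; omega) (m + 1)]
        simp [pvSpl]
  exact main vs.length vs le_rfl m a b c

theorem fd_run (vs : List Int) :
    ((PySem.List.enumerate vs 0).foldl pvFdStep (PySem.Dict.empty, 0, 1, 2)).1 = PySem.Dict.mk (pvItems vs) := by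
  rcases vs with _ | ⟨x, _ | ⟨y, _ | ⟨z, rest⟩⟩⟩
  · simp [PySem.List.enumerate, pvItems, PySem.Dict.empty]
  · simp [PySem.List.enumerate, pvItems, pvFdStep, PySem.Dict.contains,
      PySem.Dict.insert, PySem.Dict.empty]
  · simp [PySem.List.enumerate, pvItems, pvFdStep, PySem.Dict.contains,
      PySem.Dict.insert, PySem.Dict.empty]
  · rw [PySem.List.enumerate_cons, PySem.List.enumerate_cons, PySem.List.enumerate_cons]
    simp only [List.foldl_cons]
    have h3 : pvFdStep (pvFdStep (pvFdStep (PySem.Dict.empty, 0, 1, 2) (0, x)) (0 + 1, y)) (0 + 1 + 1, z)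
        = (PySem.Dict.mk [(4, [x]), (7, [y]), (10, [z])], 3, 4, 5) := by
      simp [pvFdStep, PySem.Dict.contains, PySem.Dict.insert, PySem.Dict.empty]
    rw [h3]
    rw [show (0 + 1 + 1 + 1 : Int) = 3 * ((1 : Nat) : Int) by norm_num]
    have := fd_full rest 1 [x] [y] [z]
    norm_num at this ⊢
    rw [this]
    simp [pvItems]

-- per-dict effect of A's two stages on the pvG shape
theorem A_dict (dd : PySem.Dict String Int) (hnd : dd.keys.Nodup) (a b c : PySem.Dict Int (List Int)) :
    group_format_dict_step (pvG a b c) (format_data dd)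
      = pvG (pvPush 0 a (pvSpl dd.values).1) (pvPush 0 b (pvSpl dd.values).2.1) (pvPush 0 c (pvSpl dd.values).2.2) := by
  rw [fd_eq dd hnd, fd_run]
  generalize dd.values = vs
  rcases vs with _ | ⟨x, _ | ⟨y, _ | ⟨z, rest⟩⟩⟩
  · simp [group_format_dict_step, pvItems, pvSpl, pvPush]
  · simp only [group_format_dict_step, pvItems, List.foldl_cons, List.foldl_nil]
    rw [itemStep4]
    simp [pvSpl, pvPush]
  · simp only [group_format_dict_step, pvItems, List.foldl_cons, List.foldl_nil]
    rw [itemStep4, itemStep7]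
    simp [pvSpl, pvPush]
  · simp only [group_format_dict_step, pvItems, List.foldl_cons, List.foldl_nil]
    rw [itemStep4, itemStep7, itemStep10]
    simp [pvSpl]

-- B's fused step on the pvG shape, by index residue
theorem B_step0 (m : Nat) (a b c : PySem.Dict Int (List Int)) (x : Int) :
    group_format_alt_step (pvG a b c) (3 * (m : Int), x) = pvG (pvUpd (m : Int) x a) b c := by
  have hmod : PySem.Int.mod (3 * (m : Int)) 3 = 0 := by
    rw [PySem.Int.mod_eq_emod_of_pos (by norm_num)]; omega
  have hdiv : PySem.Int.floordiv (3 * (m : Int)) 3 = (m : Int) :=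
    (PySem.Int.floordiv_eq_iff_of_pos (by norm_num)).mpr (by constructor <;> omega)
  simp only [group_format_alt_step, hmod, hdiv]
  rw [show PySem.List.pyGetD ([4, 7, 10] : List Int) 0 0 = 4 from rfl, pvG_modify4]
  rfl

theorem B_step1 (m : Nat) (a b c : PySem.Dict Int (List Int)) (y : Int) :
    group_format_alt_step (pvG a b c) (3 * (m : Int) + 1, y) = pvG a (pvUpd (m : Int) y b) c := by
  have hmod : PySem.Int.mod (3 * (m : Int) + 1) 3 = 1 := by
    rw [PySem.Int.mod_eq_emod_of_pos (by norm_num)]; omega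
  have hdiv : PySem.Int.floordiv (3 * (m : Int) + 1) 3 = (m : Int) :=
    (PySem.Int.floordiv_eq_iff_of_pos (by norm_num)).mpr (by constructor <;> omega)
  simp only [group_format_alt_step, hmod, hdiv]
  rw [show PySem.List.pyGetD ([4, 7, 10] : List Int) 1 0 = 7 from rfl, pvG_modify7]
  rfl

theorem B_step2 (m : Nat) (a b c : PySem.Dict Int (List Int)) (z : Int) :
    group_format_alt_step (pvG a b c) (3 * (m : Int) + 2, z) = pvG a b (pvUpd (m : Int) z c) := by
  have hmod : PySem.Int.mod (3 * (m : Int) + 2) 3 = 2 := by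
    rw [PySem.Int.mod_eq_emod_of_pos (by norm_num)]; omega
  have hdiv : PySem.Int.floordiv (3 * (m : Int) + 2) 3 = (m : Int) :=
    (PySem.Int.floordiv_eq_iff_of_pos (by norm_num)).mpr (by constructor <;> omega)
  simp only [group_format_alt_step, hmod, hdiv]
  rw [show PySem.List.pyGetD ([4, 7, 10] : List Int) 2 0 = 10 from rfl, pvG_modify10]
  rfl

-- per-dict effect of B's fused loop on the pvG shape
theorem B_enum : ∀ (vs : List Int) (m : Nat) (a b c : PySem.Dict Int (List Int)),
    (PySem.List.enumerate vs (3 * (m : Int))).foldl group_format_alt_step (pvG a b c)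
      = pvG (pvPush m a (pvSpl vs).1) (pvPush m b (pvSpl vs).2.1) (pvPush m c (pvSpl vs).2.2) := by
  intro vs m a b c
  have main : ∀ (fuel : Nat) (vs : List Int), vs.length ≤ fuel → ∀ (m : Nat) (a b c : PySem.Dict Int (List Int)),
      (PySem.List.enumerate vs (3 * (m : Int))).foldl group_format_alt_step (pvG a b c)
        = pvG (pvPush m a (pvSpl vs).1) (pvPush m b (pvSpl vs).2.1) (pvPush m c (pvSpl vs).2.2) := by
    intro fuel
    induction fuel with
    | zero =>
      intro vs hl m a b c
      have : vs = [] := List.length_eq_zero_iff.mp (by omega)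
      subst this
      simp [PySem.List.enumerate, pvSpl, pvPush]
    | succ fuel ih =>
      intro vs hl m a b c
      rcases vs with _ | ⟨x, _ | ⟨y, _ | ⟨z, rest⟩⟩⟩
      · simp [PySem.List.enumerate, pvSpl, pvPush]
      · rw [PySem.List.enumerate_cons, PySem.List.enumerate_nil]
        simp only [List.foldl_cons, List.foldl_nil]
        rw [B_step0]
        simp [pvSpl, pvPush]
      · rw [PySem.List.enumerate_cons, PySem.List.enumerate_cons, PySem.List.enumerate_nil]
        simp only [List.foldl_cons, List.foldl_nil]
        rw [B_step0, B_step1]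
        simp [pvSpl, pvPush]
      · rw [PySem.List.enumerate_cons, PySem.List.enumerate_cons, PySem.List.enumerate_cons]
        simp only [List.foldl_cons]
        rw [B_step0, B_step1, show (3 * (m : Int) + 1 + 1) = 3 * (m : Int) + 2 by ring, B_step2]
        rw [show (3 * (m : Int) + 2 + 1) = 3 * ((m + 1 : Nat) : Int) by push_cast; ring]
        rw [ih rest (by simp only [List.length_cons] at hl; omega) (m + 1)]
        simp [pvSpl, pvPush]
  exact main vs.length vs le_rfl m a b c

theorem B_dict (d : List (String × Int)) (a b c : PySem.Dict Int (List Int)) :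
    group_format_alt_dict_step (pvG a b c) d
      = pvG (pvPush 0 a (pvSpl (PySem.Dict.ofList d).values).1)
          (pvPush 0 b (pvSpl (PySem.Dict.ofList d).values).2.1)
          (pvPush 0 c (pvSpl (PySem.Dict.ofList d).values).2.2) := by
  have := B_enum (PySem.Dict.ofList d).values 0 a b c
  norm_num at this
  simpa [group_format_alt_dict_step] using this

theorem main_fold : ∀ (dl : List (List (String × Int))) (a b c : PySem.Dict Int (List Int)),
    dl.foldl (fun gl d => group_format_dict_step gl (format_data (PySem.Dict.ofList d))) (pvG a b c)
      = dl.foldl group_format_alt_dict_step (pvG a b c) := by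
  intro dl
  induction dl with
  | nil => intro a b c; rfl
  | cons d dl ih =>
    intro a b c
    simp only [List.foldl_cons]
    rw [A_dict (PySem.Dict.ofList d) (PySem.Dict.nodup_keys_ofList d), B_dict, ih]

-- ===== VERDICT (by name: the statement is the Claim_ definition above) =====
theorem group_format_spec : Claim_equal_group_format := by
  intro dl _
  unfold Spec_group_format group_format group_format_alt
  rw [show (PySem.Dict.ofList [(4, PySem.Dict.empty), (7, PySem.Dict.empty), (10, PySem.Dict.empty)]
      : PySem.Dict Int (PySem.Dict Int (List Int))) = pvG PySem.Dict.empty PySem.Dict.empty PySem.Dict.empty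
      from rfl]
  rw [PySem.List.foldl_append_singleton_eq_map, List.nil_append]
  simp only [List.foldl_map]
  rw [main_fold]
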